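-- pv_equiv track=rewrite | github.com/PELAB-LiU/jupyter_nbs_empirical | exception_to_library_linker/notebook_to_python_conversion.py | __map_nb_to_py_lines
-- ===== SOURCE A (Python) =====
-- from typing import Iterator, Dict, List
--
-- def __map_nb_to_py_lines(
--     python_lines: List[str], notebook_lines: List[str]
-- ) -> Dict[int, int]:
--     # You might want to clean the lines, but don't do this; it messes up indexing.
--     # python_lines = [line.strip() for line in python_lines if len(line.strip()) > 0]
--     # notebook_lines = [line.strip() for line in notebook_lines if len(line.strip()) > 0]
--
--     # The dict is initialized with `None` as not all NB lines can
--     # be mapped to python lines (e.g., magic NB methods).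
--     mapping = {nb_line_index: None for nb_line_index in range(len(notebook_lines))}
--
--     last_py_line = 0
--     for nb_line_index, nb_line in enumerate(notebook_lines):
--         for py_line_index, py_line in enumerate(
--             python_lines[last_py_line:], start=last_py_line
--         ):
--             # The stripped string is used for comparison because of newlines
--             # which might be present in one line but not in the other.
--             is_match = py_line.strip() == nb_line.strip()
--             if is_match:
--                 last_py_line = py_line_index + 1
--                 mapping[nb_line_index] = py_line_index
--                 break
--
--     return mapping
-- ===== SOURCE B (Python) =====
-- def __map_nb_to_py_lines(python_lines, notebook_lines):
--     # Index python lines by stripped text; per-key cursors give amortized O(n + m).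
--     occurrences = {}
--     for i, line in enumerate(python_lines):
--         occurrences.setdefault(line.strip(), []).append(i)
--
--     pos = {}
--     mapping = {}
--     last_py_line = 0
--     for j, nb_line in enumerate(notebook_lines):
--         key = nb_line.strip()
--         idxs = occurrences.get(key, [])
--         p = pos.get(key, 0)
--         while p < len(idxs) and idxs[p] < last_py_line:
--             p += 1
--         pos[key] = p
--         if p < len(idxs):
--             mapping[j] = idxs[p]
--             last_py_line = idxs[p] + 1
--         else:
--             mapping[j] = None
--     return mapping
-- ===== Notes on version B (the rewrite author's own statement) =====
-- stated objective: faster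
-- what changed: Instead of rescanning the python-lines suffix for every notebook line, B builds one dict from stripped python line to its list of indices and answers each notebook line by advancing a per-key cursor to the first index >= last_py_line (cursors only move forward, so all skips amortize).
import Mathlib
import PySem

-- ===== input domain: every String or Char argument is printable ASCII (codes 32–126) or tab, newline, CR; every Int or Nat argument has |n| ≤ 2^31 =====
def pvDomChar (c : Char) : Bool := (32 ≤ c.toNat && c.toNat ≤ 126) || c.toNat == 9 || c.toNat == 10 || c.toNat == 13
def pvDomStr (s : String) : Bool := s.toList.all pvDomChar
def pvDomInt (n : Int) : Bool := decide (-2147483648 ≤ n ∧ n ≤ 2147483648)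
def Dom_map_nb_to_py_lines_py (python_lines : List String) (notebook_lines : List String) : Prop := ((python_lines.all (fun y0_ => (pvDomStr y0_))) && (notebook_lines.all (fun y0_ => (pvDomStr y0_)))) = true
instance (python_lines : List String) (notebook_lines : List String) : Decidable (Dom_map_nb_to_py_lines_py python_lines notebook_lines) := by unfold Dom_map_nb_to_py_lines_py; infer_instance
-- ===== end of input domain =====

-- B replaces A's per-notebook-line rescan of the python-lines suffix by a dict from stripped
-- python line to its index list with per-key forward cursors (objective: faster).

-- ===== PORT A =====
-- inner 'for py_line_index, py_line in enumerate(python_lines[last:], start=last): … if is_match: … break'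
def pvInnerA (pairs : List (Int × String)) (nbLine : String) : Option Int :=
  match pairs with
  | [] => none
  | (i, s) :: rest =>
    if PySem.Str.strip s = PySem.Str.strip nbLine then some i else pvInnerA rest nbLine

-- one iteration of the outer 'for nb_line_index, nb_line in enumerate(notebook_lines)'
def pvStepA (python_lines : List String) (st : PySem.Dict Int (Option Int) × Int)
    (pr : Int × String) : PySem.Dict Int (Option Int) × Int :=
  match pvInnerA (PySem.List.enumerate (PySem.List.slice python_lines (some st.2) none) st.2) pr.2 with
  | none => st
  | some i => (st.1.insert pr.1 (some i), i + 1)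

def map_nb_to_py_lines_py (python_lines : List String) (notebook_lines : List String) :
    List (Int × Option Int) :=
  -- mapping = {nb_line_index: None for nb_line_index in range(len(notebook_lines))}
  let mapping0 : PySem.Dict Int (Option Int) :=
    (PySem.List.pyRange 0 notebook_lines.length 1).foldl (fun d i => d.insert i none) PySem.Dict.empty
  let res := (PySem.List.enumerate notebook_lines 0).foldl (pvStepA python_lines) (mapping0, 0)
  res.1.items

-- ===== PORT B =====
-- occurrences: stripped python line -> increasing list of its indices (setdefault(key, []).append(i))
def pvOcc (python_lines : List String) : PySem.Dict String (List Int) :=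
  ((PySem.List.enumerate python_lines 0).map (fun p => (PySem.Str.strip p.2, p.1))).foldl
    (fun d q => d.modify q.1 [] (· ++ [q.2])) PySem.Dict.empty

-- 'while p < len(idxs) and idxs[p] < last_py_line: p += 1'
def pvSkip (idxs : List Int) (last : Int) (p : Nat) : Nat :=
  if h : p < idxs.length then
    if idxs[p] < last then pvSkip idxs last (p + 1) else p
  else p
termination_by idxs.length - p

-- one iteration of B's 'for j, nb_line in enumerate(notebook_lines)'
def pvStepB (occ : PySem.Dict String (List Int))
    (st : PySem.Dict String Nat × PySem.Dict Int (Option Int) × Int) (pr : Int × String) :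
    PySem.Dict String Nat × PySem.Dict Int (Option Int) × Int :=
  let key := PySem.Str.strip pr.2
  let idxs := occ.getD key []
  let p := pvSkip idxs st.2.2 (st.1.getD key 0)
  if h : p < idxs.length then
    (st.1.insert key p, st.2.1.insert pr.1 (some idxs[p]), idxs[p] + 1)
  else
    (st.1.insert key p, st.2.1.insert pr.1 none, st.2.2)

def map_nb_to_py_lines_py_alt (python_lines : List String) (notebook_lines : List String) :
    List (Int × Option Int) :=
  let occ := pvOcc python_lines
  let res := (PySem.List.enumerate notebook_lines 0).foldl (pvStepB occ)
    (PySem.Dict.empty, PySem.Dict.empty, 0)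
  res.2.1.items

-- ===== PRECONDITION & SPEC =====
def Spec_map_nb_to_py_lines_py (python_lines : List String) (notebook_lines : List String) (out : List (Int × Option Int)) : Prop := out = map_nb_to_py_lines_py_alt python_lines notebook_lines
instance (python_lines : List String) (notebook_lines : List String) (out : List (Int × Option Int)) : Decidable (Spec_map_nb_to_py_lines_py python_lines notebook_lines out) := by unfold Spec_map_nb_to_py_lines_py; infer_instance

-- ===== CLAIM (what is proved, stated in full; the proofs are below) =====
def Claim_equal_map_nb_to_py_lines_py : Prop := ∀ (python_lines : List String) (notebook_lines : List String), Dom_map_nb_to_py_lines_py python_lines notebook_lines → Spec_map_nb_to_py_lines_py python_lines notebook_lines (map_nb_to_py_lines_py python_lines notebook_lines)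

-- ===== LEMMAS AND PROOFS =====

-- the indices (from offset s) of the python lines whose strip equals key, in increasing order
def pvOccList (py : List String) (s : Int) (key : String) : List Int :=
  match py with
  | [] => []
  | x :: xs =>
    if PySem.Str.strip x = key then s :: pvOccList xs (s + 1) key else pvOccList xs (s + 1) key

-- the common reference computation both ports are reduced to
def pvCore (py : List String) (nb : List String) (j : Int) (last : Int) : List (Int × Option Int) :=
  match nb with
  | [] => []
  | x :: rest =>
    match ((pvOccList py 0 (PySem.Str.strip x)).dropWhile (fun i => decide (i < last))).head? with
    | none => (j, none) :: pvCore py rest (j + 1) last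
    | some i => (j, some i) :: pvCore py rest (j + 1) (i + 1)

theorem pvOccList_le {py : List String} {key : String} :
    ∀ (s : Int), ∀ i ∈ pvOccList py s key, s ≤ i := by
  induction py with
  | nil => intro s i hi; simp [pvOccList] at hi
  | cons x xs ih =>
    intro s i hi
    simp only [pvOccList] at hi
    split at hi
    · rcases List.mem_cons.1 hi with h | h
      · omega
      · have := ih (s+1) i h; omega
    · have := ih (s+1) i hi; omega

theorem pvInnerA_eq_head (l : List String) (nb : String) :
    ∀ (s : Int), pvInnerA (PySem.List.enumerate l s) nb = (pvOccList l s (PySem.Str.strip nb)).head? := by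
  induction l with
  | nil => intro s; simp [pvOccList, PySem.List.enumerate_nil, pvInnerA]
  | cons x xs ih =>
    intro s
    rw [PySem.List.enumerate_cons]
    simp only [pvInnerA, pvOccList]
    split
    · simp
    · simpa using ih (s+1)

theorem pvOccList_drop (py : List String) (key : String) :
    ∀ (t : Nat) (s : Int), pvOccList (py.drop t) (s + t) key
      = (pvOccList py s key).dropWhile (fun i => decide (i < s + t)) := by
  induction py with
  | nil => intro t s; simp [pvOccList]
  | cons x xs ih =>
    intro t s
    cases t with
    | zero =>
      simp only [List.drop_zero, Int.natCast_zero, add_zero]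
      symm
      apply List.dropWhile_eq_self_iff.2
      intro h
      have hle := pvOccList_le (py := x :: xs) (key := key) s _
        (List.getElem_mem (l := pvOccList (x :: xs) s key) (n := 0) h)
      simp only [decide_eq_true_eq]
      omega
    | succ t =>
      have h1 : pvOccList (xs.drop t) ((s+1) + t) key
          = (pvOccList xs (s+1) key).dropWhile (fun i => decide (i < (s+1) + t)) := ih t (s+1)
      simp only [List.drop_succ_cons, pvOccList]
      split
      · rw [List.dropWhile_cons_of_pos (by simp only [decide_eq_true_eq]; omega)]
        rw [show s + ((t+1:Nat):Int) = (s+1)+(t:Int) by push_cast; ring] at *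
        rw [h1]
      · rw [show s + ((t+1:Nat):Int) = (s+1)+(t:Int) by push_cast; ring] at *
        rw [h1]

theorem pvOcc_filter (py : List String) (key : String) :
    ∀ (s : Int), (((PySem.List.enumerate py s).map (fun p => (PySem.Str.strip p.2, p.1))).filter
        (fun q => q.1 == key)).map (·.2) = pvOccList py s key := by
  induction py with
  | nil => intro s; simp [pvOccList, PySem.List.enumerate_nil]
  | cons x xs ih =>
    intro s
    rw [PySem.List.enumerate_cons]
    simp only [List.map_cons, List.filter_cons, pvOccList]
    by_cases h : PySem.Str.strip x = key
    · simp [h, ih (s+1)]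
    · simp [h, ih (s+1)]

theorem pvOcc_getD (py : List String) (key : String) :
    (pvOcc py).getD key [] = pvOccList py 0 key := by
  rw [pvOcc, PySem.Dict.getD_foldl_modify_append]
  simp [pvOcc_filter]

theorem pvSkip_unfold (idxs : List Int) (last : Int) :
    ∀ p, pvSkip idxs last p = p + ((idxs.drop p).takeWhile (fun i => decide (i < last))).length := by
  intro p
  induction hn : idxs.length - p generalizing p with
  | zero =>
    rw [pvSkip]
    have hd : idxs.drop p = [] := List.drop_eq_nil_of_le (by omega)
    have hnp : ¬ p < idxs.length := by omega
    simp [hd, hnp]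
  | succ n ih =>
    have hp : p < idxs.length := by omega
    rw [pvSkip]
    simp only [hp, dite_true]
    have hdrop : idxs.drop p = idxs[p] :: idxs.drop (p+1) := List.drop_eq_getElem_cons hp
    by_cases hv : idxs[p] < last
    · rw [if_pos hv, ih (p+1) (by omega), hdrop,
        List.takeWhile_cons_of_pos (by simpa using hv)]
      simp; omega
    · rw [if_neg hv, hdrop, List.takeWhile_cons_of_neg (by simpa using hv)]
      simp

-- the cursor loop lands on the length of the satisfied prefix, provided everything
-- before the starting cursor already satisfied the bound (B's loop invariant)
theorem pvSkip_eq (idxs : List Int) (last : Int)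
    (p : Nat) (hle : p ≤ idxs.length)
    (hlt : ∀ q (hq : q < idxs.length), q < p → idxs[q] < last) :
    pvSkip idxs last p = (idxs.takeWhile (fun i => decide (i < last))).length := by
  rw [pvSkip_unfold]
  have hsplit : idxs.takeWhile (fun i => decide (i < last))
      = idxs.take p ++ (idxs.drop p).takeWhile (fun i => decide (i < last)) := by
    conv_lhs => rw [← List.take_append_drop p idxs]
    rw [List.takeWhile_append]
    have hself : (idxs.take p).takeWhile (fun i => decide (i < last)) = idxs.take p := by
      apply List.takeWhile_eq_self_iff.2
      intro x hx
      obtain ⟨q, hq, rfl⟩ := List.mem_iff_getElem.1 hx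
      rw [List.getElem_take]
      simp only [decide_eq_true_eq]
      exact hlt q (by simp at hq; omega) (by simp at hq; omega)
    rw [hself]
    simp [List.length_take, Nat.min_eq_left hle]
  rw [hsplit]
  simp [List.length_take, Nat.min_eq_left hle]

-- dropWhile is the drop at the takeWhile length (no Mathlib lemma states this directly)
theorem pvDropWhile_eq_drop (l : List Int) (p : Int → Bool) :
    l.dropWhile p = l.drop (l.takeWhile p).length := by
  conv_lhs => rw [show l.dropWhile p
    = (l.takeWhile p ++ l.dropWhile p).drop (l.takeWhile p).length from (List.drop_left).symm]
  rw [List.takeWhile_append_dropWhile]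

-- the head of a dropWhile fails the predicate
theorem pvHead_dropWhile (l : List Int) (p : Int → Bool) (x : Int)
    (h : (l.dropWhile p).head? = some x) : p x = false := by
  have hne : l.dropWhile p ≠ [] := by intro he; rw [he] at h; simp at h
  have h2 := List.head_dropWhile_not (p := p) (l := l) hne
  rw [List.head?_eq_some_head hne, Option.some_inj] at h
  rw [h] at h2
  simpa using h2

-- A's inner scan over the python-lines suffix, in terms of the global occurrence list
theorem pvMatchA (py : List String) (last : Int) (x : String) (h0 : 0 ≤ last) :
    pvInnerA (PySem.List.enumerate (PySem.List.slice py (some last) none) last) x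
      = ((pvOccList py 0 (PySem.Str.strip x)).dropWhile (fun i => decide (i < last))).head? := by
  rw [PySem.List.slice_from (ha := h0), pvInnerA_eq_head]
  have h2 := pvOccList_drop py (PySem.Str.strip x) last.toNat 0
  rw [show (0:Int) + ((last.toNat : Nat) : Int) = last by omega] at h2
  rw [h2]

theorem A_fold_items (py : List String) :
    ∀ (nb : List String) (j last : Int) (mapping : PySem.Dict Int (Option Int))
      (pre : List (Int × Option Int)),
      0 ≤ last →
      mapping.items = pre ++ (PySem.List.pyRange j (j + nb.length) 1).map (fun i => (i, (none : Option Int))) →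
      (∀ q ∈ pre, ¬ (j ≤ q.1 ∧ q.1 < j + nb.length)) →
      ((PySem.List.enumerate nb j).foldl (pvStepA py) (mapping, last)).1.items
        = pre ++ pvCore py nb j last := by
  intro nb
  induction nb with
  | nil =>
    intro j last mapping pre h0 hitems hpre
    rw [PySem.List.enumerate_nil]
    simpa [pvCore, PySem.List.pyRange_one_eq_nil (le_refl j)] using hitems
  | cons x rest ih =>
    intro j last mapping pre h0 hitems hpre
    have hlen : (j : Int) + ((x :: rest).length : Int) = (j + 1) + (rest.length : Int) := by
      simp [List.length_cons]; ring
    have hsplit : PySem.List.pyRange j (j + ((x :: rest).length : Int)) 1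
        = j :: PySem.List.pyRange (j+1) ((j+1) + (rest.length : Int)) 1 := by
      rw [hlen]
      exact PySem.List.pyRange_one_cons (by omega)
    rw [PySem.List.enumerate_cons, List.foldl_cons]
    have hbridge := pvMatchA py last x h0
    cases hh : ((pvOccList py 0 (PySem.Str.strip x)).dropWhile (fun i => decide (i < last))).head? with
    | none =>
      have hstep : pvStepA py (mapping, last) (j, x) = (mapping, last) := by
        simp [pvStepA, hbridge, hh]
      rw [hstep, ih (j+1) last mapping (pre ++ [(j, none)]) h0
        (by rw [hitems, hsplit]; simp)
        (by
          intro q hq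
          rcases List.mem_append.1 hq with h | h
          · have := hpre q h; simp only [List.length_cons] at this; push_cast at this ⊢; omega
          · simp only [List.mem_singleton] at h; subst h; simp only; omega)]
      simp [pvCore, hh]
    | some i =>
      have hiocc : i ∈ pvOccList py 0 (PySem.Str.strip x) :=
        (List.dropWhile_sublist _).mem (List.mem_of_mem_head? hh)
      have hi0 : (0 : Int) ≤ i := pvOccList_le 0 i hiocc
      have hcontains : mapping.contains j = true := by
        rw [PySem.Dict.contains_iff_mem_keys]
        show j ∈ mapping.items.map (·.1)
        rw [hitems, hsplit]
        simp
      have hstep : pvStepA py (mapping, last) (j, x) = (mapping.insert j (some i), i + 1) := by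
        simp [pvStepA, hbridge, hh]
      have hitems' : (mapping.insert j (some i)).items
          = (pre ++ [(j, some i)])
            ++ (PySem.List.pyRange (j+1) ((j+1) + (rest.length : Int)) 1).map
                (fun r => (r, (none : Option Int))) := by
        rw [PySem.Dict.items_insert_of_contains (h := hcontains), hitems, hsplit]
        rw [List.map_append, List.map_cons]
        have hpre' : pre.map (fun p => if p.1 == j then ((j:Int), some i) else p) = pre := by
          conv_rhs => rw [← List.map_id pre]
          apply List.map_congr_left
          intro q hq
          have := hpre q hq
          have hne : q.1 ≠ j := by simp only [List.length_cons] at this; push_cast at this; omega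
          simp [hne]
        have htail : (PySem.List.pyRange (j+1) ((j+1) + (rest.length : Int)) 1).map
              ((fun p => if p.1 == j then ((j:Int), some i) else p) ∘ (fun r => (r, (none : Option Int))))
            = (PySem.List.pyRange (j+1) ((j+1) + (rest.length : Int)) 1).map
              (fun r => (r, (none : Option Int))) := by
          apply List.map_congr_left
          intro r hr
          have := (PySem.List.mem_pyRange_one).1 hr
          have hne : r ≠ j := by omega
          simp [hne]
        rw [hpre', List.map_cons, List.map_map, htail]
        simp
      rw [hstep, ih (j+1) (i+1) (mapping.insert j (some i)) (pre ++ [(j, some i)]) (by omega)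
        hitems'
        (by
          intro q hq
          rcases List.mem_append.1 hq with h | h
          · have := hpre q h; simp only [List.length_cons] at this; push_cast at this ⊢; omega
          · simp only [List.mem_singleton] at h; subst h; simp only; omega)]
      simp [pvCore, hh]

theorem B_fold_items (py : List String) :
    ∀ (nb : List String) (j last : Int) (pos : PySem.Dict String Nat)
      (mapping : PySem.Dict Int (Option Int)),
      0 ≤ last →
      (∀ k ∈ mapping.keys, k < j) →
      (∀ key, pos.getD key 0 ≤ (pvOccList py 0 key).length ∧
        ∀ q (hq : q < (pvOccList py 0 key).length), q < pos.getD key 0 → (pvOccList py 0 key)[q] < last) →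
      ((PySem.List.enumerate nb j).foldl (pvStepB (pvOcc py)) (pos, mapping, last)).2.1.items
        = mapping.items ++ pvCore py nb j last := by
  intro nb
  induction nb with
  | nil =>
    intro j last pos mapping h0 hkeys hpos
    rw [PySem.List.enumerate_nil]
    simp [pvCore]
  | cons x rest ih =>
    intro j last pos mapping h0 hkeys hpos
    rw [PySem.List.enumerate_cons, List.foldl_cons]
    set key := PySem.Str.strip x with hkey
    set L := pvOccList py 0 key with hL
    have hgetD : (pvOcc py).getD key [] = L := pvOcc_getD py key
    have hskip : pvSkip L last (pos.getD key 0)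
        = (L.takeWhile (fun i => decide (i < last))).length :=
      pvSkip_eq L last (pos.getD key 0) (hpos key).1 (hpos key).2
    set r := (L.takeWhile (fun i => decide (i < last))).length with hr
    have hrle : r ≤ L.length := (List.takeWhile_prefix _).length_le
    have hcontainsj : mapping.contains j = false := by
      rcases h : mapping.contains j with _ | _
      · rfl
      · exact absurd (hkeys j (PySem.Dict.contains_iff_mem_keys mapping j |>.1 h)) (by omega)
    have hkeys' : ∀ (v : Option Int), ∀ k ∈ (mapping.insert j v).keys, k < j + 1 := by
      intro v k hk
      rcases (PySem.Dict.mem_keys_insert mapping j k v).1 hk with h | h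
      · omega
      · have := hkeys k h; omega
    by_cases hrlen : r < L.length
    · -- matched: the cursor found the first occurrence ≥ last
      have hhead : (L.dropWhile (fun i => decide (i < last))).head? = some L[r] := by
        rw [pvDropWhile_eq_drop, List.head?_drop, ← hr, List.getElem?_eq_getElem hrlen]
      have hstep : pvStepB (pvOcc py) (pos, mapping, last) (j, x)
          = (pos.insert key r, mapping.insert j (some L[r]), L[r] + 1) := by
        simp only [pvStepB, ← hkey, hgetD, hskip]
        rw [dif_pos hrlen]
      have hfail : ¬ (L[r] < last) := by
        have := pvHead_dropWhile L (fun i => decide (i < last)) L[r] hhead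
        simpa using this
      have h0' : (0 : Int) ≤ L[r] + 1 := by
        have := pvOccList_le (py := py) (key := key) 0 L[r] (List.getElem_mem hrlen)
        omega
      have hpos' : ∀ key', (pos.insert key r).getD key' 0 ≤ (pvOccList py 0 key').length ∧
          ∀ q (hq : q < (pvOccList py 0 key').length), q < (pos.insert key r).getD key' 0 →
            (pvOccList py 0 key')[q] < L[r] + 1 := by
        intro key'
        rw [PySem.Dict.getD_insert]
        by_cases hk : key' = key
        · subst hk
          simp only [if_true, ← hL]
          refine ⟨hrle, ?_⟩
          intro q hq hqr
          have hq' : L[q]'(by omega) = (L.takeWhile (fun i => decide (i < last)))[q]'(by omega) :=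
            ((List.takeWhile_prefix _).getElem (by omega)).symm
          have hmem := List.mem_takeWhile_imp
            (List.getElem_mem (l := L.takeWhile (fun i => decide (i < last))) (n := q) (by omega))
          rw [hq']
          simp only [decide_eq_true_eq] at hmem
          omega
        · simp only [if_neg hk]
          refine ⟨(hpos key').1, ?_⟩
          intro q hq hqp
          have := (hpos key').2 q hq hqp
          omega
      rw [hstep, ih (j+1) (L[r]+1) (pos.insert key r) (mapping.insert j (some L[r])) h0'
        (hkeys' _) hpos']
      rw [PySem.Dict.items_insert_of_not_contains (h := hcontainsj)]
      simp only [pvCore, ← hkey, ← hL, hhead, List.append_assoc, List.cons_append, List.nil_append]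
    · -- no occurrence ≥ last: the whole occurrence list is below last
      have hreq : r = L.length := by omega
      have hhead : (L.dropWhile (fun i => decide (i < last))).head? = none := by
        rw [pvDropWhile_eq_drop, ← hr, hreq, List.drop_length]
        rfl
      have hstep : pvStepB (pvOcc py) (pos, mapping, last) (j, x)
          = (pos.insert key r, mapping.insert j none, last) := by
        simp only [pvStepB, ← hkey, hgetD, hskip]
        rw [dif_neg hrlen]
      have hpos' : ∀ key', (pos.insert key r).getD key' 0 ≤ (pvOccList py 0 key').length ∧
          ∀ q (hq : q < (pvOccList py 0 key').length), q < (pos.insert key r).getD key' 0 →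
            (pvOccList py 0 key')[q] < last := by
        intro key'
        rw [PySem.Dict.getD_insert]
        by_cases hk : key' = key
        · subst hk
          simp only [if_true, ← hL]
          refine ⟨by omega, ?_⟩
          intro q hq hqr
          have hq' : L[q]'(by omega) = (L.takeWhile (fun i => decide (i < last)))[q]'(by omega) :=
            ((List.takeWhile_prefix _).getElem (by omega)).symm
          have hmem := List.mem_takeWhile_imp
            (List.getElem_mem (l := L.takeWhile (fun i => decide (i < last))) (n := q) (by omega))
          rw [hq']
          simpa using hmem
        · simp only [if_neg hk]
          exact hpos key'
      rw [hstep, ih (j+1) last (pos.insert key r) (mapping.insert j none) h0 (hkeys' _) hpos']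
      rw [PySem.Dict.items_insert_of_not_contains (h := hcontainsj)]
      simp only [pvCore, ← hkey, ← hL, hhead, List.append_assoc, List.cons_append, List.nil_append]

-- ===== VERDICT (by name: the statement is the Claim_ definition above) =====
theorem map_nb_to_py_lines_py_spec : Claim_equal_map_nb_to_py_lines_py := by
  intro py nb _
  unfold Spec_map_nb_to_py_lines_py map_nb_to_py_lines_py map_nb_to_py_lines_py_alt
  have hitems0 : ((PySem.List.pyRange 0 (nb.length : Int) 1).foldl
      (fun d i => d.insert i none) (PySem.Dict.empty (κ := Int) (ν := Option Int))).items
      = ([] : List (Int × Option Int))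
        ++ (PySem.List.pyRange 0 (0 + (nb.length : Int)) 1).map (fun i => (i, (none : Option Int))) := by
    have h := PySem.Dict.items_foldl_insert_fresh (PySem.List.pyRange 0 (nb.length : Int) 1)
      (fun i => i) (fun _ => (none : Option Int)) PySem.Dict.empty
      (fun a _ => PySem.Dict.contains_empty a)
      (by simpa using PySem.List.nodup_pyRange_one 0 (nb.length : Int))
    simpa [show (0 : Int) + (nb.length : Int) = (nb.length : Int) by ring] using h
  have hA := A_fold_items py nb 0 0
    ((PySem.List.pyRange 0 (nb.length : Int) 1).foldl (fun d i => d.insert i none) PySem.Dict.empty)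
    [] (le_refl 0) hitems0 (by simp)
  have hB := B_fold_items py nb 0 0 PySem.Dict.empty PySem.Dict.empty (le_refl 0)
    (by intro k hk; simp [PySem.Dict.keys_empty] at hk)
    (by
      intro key
      refine ⟨by simp [PySem.Dict.getD_empty], ?_⟩
      intro q hq hq0
      rw [PySem.Dict.getD_empty] at hq0
      omega)
  simp only [List.nil_append] at hA
  rw [hA, hB]
  rfl
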